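-- pv_equiv track=rewrite | github.com/zhenerBY/git_learning | range.py | rg
-- ===== SOURCE A (Python) =====
-- def rg(a: int, b: int, c: int = 1) -> list:
--     """Замена RANGE"""
--     list1 = []
--     n = int(a)
--     if c == 0:
--         return list1
--     elif c > 0:
--         while n < b:
--             list1.append(n)
--             n += c
--     elif c < 0:
--         while n > b:
--             list1.append(n)
--             n += c
--     return list1
-- ===== SOURCE B (Python) =====
-- def rg(a: int, b: int, c: int = 1) -> list:
--     """Closed-form range: compute the element count, then generate by index."""
--     if c == 0:
--         return []
--     start = int(a)
--     count = max(0, -(-(b - start) // c))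
--     return [start + i * c for i in range(count)]
-- ===== Notes on version B (the rewrite author's own statement) =====
-- stated objective: simpler
-- what changed: Replaced the accumulate-and-test while loops (separate c>0 and c<0 branches) by a single closed-form element count via ceiling division followed by one index-driven list comprehension.
import Mathlib
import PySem

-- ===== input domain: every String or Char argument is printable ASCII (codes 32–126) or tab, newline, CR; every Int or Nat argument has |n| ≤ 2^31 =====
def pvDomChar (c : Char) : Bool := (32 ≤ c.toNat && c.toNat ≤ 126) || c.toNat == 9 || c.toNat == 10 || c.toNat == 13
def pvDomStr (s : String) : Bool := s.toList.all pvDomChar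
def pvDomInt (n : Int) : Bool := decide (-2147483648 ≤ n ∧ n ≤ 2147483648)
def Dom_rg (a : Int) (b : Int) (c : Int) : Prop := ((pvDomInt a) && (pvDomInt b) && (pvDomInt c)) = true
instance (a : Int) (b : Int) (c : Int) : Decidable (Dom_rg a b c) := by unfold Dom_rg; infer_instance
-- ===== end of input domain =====

-- B replaces A's accumulate-and-test while loop by a closed-form element count
-- followed by one index-driven list comprehension (objective: simpler decomposition).

-- ===== PORT A =====
-- the `while n < b` loop (c > 0)
def rgPos (b c : Int) (hc : 0 < c) (n : Int) : List Int :=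
  if h : n < b then n :: rgPos b c hc (n + c) else []
termination_by (b - n).toNat
decreasing_by omega

-- the `while n > b` loop (c < 0)
def rgNeg (b c : Int) (hc : c < 0) (n : Int) : List Int :=
  if h : n > b then n :: rgNeg b c hc (n + c) else []
termination_by (n - b).toNat
decreasing_by omega

def rg (a : Int) (b : Int) (c : Int) : List Int :=
  let n := a            -- n = int(a): identity on Int
  if _h0 : c = 0 then []
  else if hpos : 0 < c then rgPos b c hpos n
  else if hneg : c < 0 then rgNeg b c hneg n
  else []               -- unreachable

-- ===== PORT B =====
def rg_alt (a : Int) (b : Int) (c : Int) : List Int :=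
  if c = 0 then []
  else
    let start := a
    let count := max 0 (-(PySem.Int.floordiv (-(b - start)) c))
    (List.range count.toNat).map (fun (i : Nat) => start + (i : Int) * c)

-- ===== PRECONDITION & SPEC =====
def Spec_rg (a : Int) (b : Int) (c : Int) (out : List Int) : Prop := out = rg_alt a b c
instance (a : Int) (b : Int) (c : Int) (out : List Int) : Decidable (Spec_rg a b c out) := by unfold Spec_rg; infer_instance

-- ===== CLAIM (what is proved, stated in full; the proofs are below) =====
def Claim_equal_rg : Prop := ∀ (a : Int) (b : Int) (c : Int), Dom_rg a b c → Spec_rg a b c (rg a b c)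

-- ===== LEMMAS AND PROOFS =====

-- ceiling-division bracket for a negative divisor, derived from the positive-divisor one
theorem ceil_bracket_neg (x c q : Int) (hc : c < 0) :
    -(PySem.Int.floordiv (-x) c) = q ↔ (q - 1) * (-c) < -x ∧ -x ≤ q * (-c) := by
  have h1 : PySem.Int.floordiv (-x) c = PySem.Int.floordiv (-(-x)) (-c) := by
    rw [neg_neg]
    simpa using PySem.Int.floordiv_neg_neg x (-c)
  rw [h1]
  exact PySem.Int.neg_floordiv_neg_eq_iff_of_pos (by omega)

theorem rgPos_eq (b c : Int) (hc : 0 < c) (n : Int) :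
    rgPos b c hc n =
      (List.range (max 0 (-(PySem.Int.floordiv (-(b - n)) c))).toNat).map
        (fun (i : Nat) => n + (i : Int) * c) := by
  suffices H : ∀ m n, (b - n).toNat ≤ m →
      rgPos b c hc n =
        (List.range (max 0 (-(PySem.Int.floordiv (-(b - n)) c))).toNat).map
          (fun (i : Nat) => n + (i : Int) * c) from H _ n le_rfl
  intro m
  induction m with
  | zero =>
    intro n hm
    have hnb : ¬ n < b := by omega
    rw [rgPos, dif_neg hnb]
    have hbr : ((-(PySem.Int.floordiv (-(b - n)) c)) - 1) * c < b - n ∧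
        b - n ≤ (-(PySem.Int.floordiv (-(b - n)) c)) * c :=
      (PySem.Int.neg_floordiv_neg_eq_iff_of_pos hc).mp rfl
    set k := -(PySem.Int.floordiv (-(b - n)) c) with hk
    have hk0 : k ≤ 0 := by
      by_contra hpos
      push_neg at hpos
      have : 0 ≤ (k - 1) * c := mul_nonneg (by omega) hc.le
      have hbn : b - n ≤ 0 := by omega
      linarith [hbr.1]
    have : (max 0 k).toNat = 0 := by omega
    simp [this]
  | succ m ih =>
    intro n hm
    by_cases h : n < b
    · rw [rgPos, dif_pos h]
      have ihc := ih (n + c) (by omega)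
      rw [ihc]
      set k' := -(PySem.Int.floordiv (-(b - (n + c))) c) with hk'
      have hbr' : (k' - 1) * c < b - (n + c) ∧ b - (n + c) ≤ k' * c :=
        (PySem.Int.neg_floordiv_neg_eq_iff_of_pos hc).mp rfl
      have hkk : -(PySem.Int.floordiv (-(b - n)) c) = k' + 1 := by
        rw [PySem.Int.neg_floordiv_neg_eq_iff_of_pos hc]
        constructor
        · nlinarith [hbr'.1, hbr'.2]
        · nlinarith [hbr'.2]
      rw [hkk]
      have hk'0 : 0 ≤ k' := by
        by_contra hneg
        push_neg at hneg
        have h2 : k' * c ≤ (-1) * c := mul_le_mul_of_nonneg_right (by omega : k' ≤ -1) hc.le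
        linarith [hbr'.2, h2, h]
      have hmax : (max 0 (k' + 1)).toNat = (max 0 k').toNat + 1 := by omega
      rw [hmax, List.range_succ_eq_map, List.map_cons, List.map_map]
      simp only [Nat.cast_zero, zero_mul, add_zero]
      congr 1
      apply List.map_congr_left
      intro i _
      simp only [Function.comp_apply]
      push_cast
      ring
    · rw [rgPos, dif_neg h]
      have hbr : ((-(PySem.Int.floordiv (-(b - n)) c)) - 1) * c < b - n ∧
          b - n ≤ (-(PySem.Int.floordiv (-(b - n)) c)) * c :=
        (PySem.Int.neg_floordiv_neg_eq_iff_of_pos hc).mp rfl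
      set k := -(PySem.Int.floordiv (-(b - n)) c) with hk
      have hk0 : k ≤ 0 := by
        by_contra hpos
        push_neg at hpos
        have : 0 ≤ (k - 1) * c := mul_nonneg (by omega) hc.le
        have hbn : b - n ≤ 0 := by omega
        linarith [hbr.1]
      have : (max 0 k).toNat = 0 := by omega
      simp [this]

theorem rgNeg_eq (b c : Int) (hc : c < 0) (n : Int) :
    rgNeg b c hc n =
      (List.range (max 0 (-(PySem.Int.floordiv (-(b - n)) c))).toNat).map
        (fun (i : Nat) => n + (i : Int) * c) := by
  suffices H : ∀ m n, (n - b).toNat ≤ m →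
      rgNeg b c hc n =
        (List.range (max 0 (-(PySem.Int.floordiv (-(b - n)) c))).toNat).map
          (fun (i : Nat) => n + (i : Int) * c) from H _ n le_rfl
  intro m
  induction m with
  | zero =>
    intro n hm
    have hnb : ¬ n > b := by omega
    rw [rgNeg, dif_neg hnb]
    have hbr : ((-(PySem.Int.floordiv (-(b - n)) c)) - 1) * (-c) < -(b - n) ∧
        -(b - n) ≤ (-(PySem.Int.floordiv (-(b - n)) c)) * (-c) :=
      (ceil_bracket_neg (b - n) c _ hc).mp rfl
    set k := -(PySem.Int.floordiv (-(b - n)) c) with hk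
    have hk0 : k ≤ 0 := by
      by_contra hpos
      push_neg at hpos
      have : 0 ≤ (k - 1) * (-c) := mul_nonneg (by omega) (by omega)
      have hbn : -(b - n) ≤ 0 := by omega
      linarith [hbr.1]
    have : (max 0 k).toNat = 0 := by omega
    simp [this]
  | succ m ih =>
    intro n hm
    by_cases h : n > b
    · rw [rgNeg, dif_pos h]
      have ihc := ih (n + c) (by omega)
      rw [ihc]
      set k' := -(PySem.Int.floordiv (-(b - (n + c))) c) with hk'
      have hbr' : (k' - 1) * (-c) < -(b - (n + c)) ∧ -(b - (n + c)) ≤ k' * (-c) :=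
        (ceil_bracket_neg (b - (n + c)) c _ hc).mp rfl
      have hkk : -(PySem.Int.floordiv (-(b - n)) c) = k' + 1 := by
        rw [ceil_bracket_neg (b - n) c _ hc]
        constructor
        · nlinarith [hbr'.1, hbr'.2]
        · nlinarith [hbr'.2]
      rw [hkk]
      have hk'0 : 0 ≤ k' := by
        by_contra hneg
        push_neg at hneg
        have h2 : k' * (-c) ≤ (-1) * (-c) := mul_le_mul_of_nonneg_right (by omega : k' ≤ -1) (by omega)
        linarith [hbr'.2, h2, h]
      have hmax : (max 0 (k' + 1)).toNat = (max 0 k').toNat + 1 := by omega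
      rw [hmax, List.range_succ_eq_map, List.map_cons, List.map_map]
      simp only [Nat.cast_zero, zero_mul, add_zero]
      congr 1
      apply List.map_congr_left
      intro i _
      simp only [Function.comp_apply]
      push_cast
      ring
    · rw [rgNeg, dif_neg h]
      have hbr : ((-(PySem.Int.floordiv (-(b - n)) c)) - 1) * (-c) < -(b - n) ∧
          -(b - n) ≤ (-(PySem.Int.floordiv (-(b - n)) c)) * (-c) :=
        (ceil_bracket_neg (b - n) c _ hc).mp rfl
      set k := -(PySem.Int.floordiv (-(b - n)) c) with hk
      have hk0 : k ≤ 0 := by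
        by_contra hpos
        push_neg at hpos
        have : 0 ≤ (k - 1) * (-c) := mul_nonneg (by omega) (by omega)
        have hbn : -(b - n) ≤ 0 := by omega
        linarith [hbr.1]
      have : (max 0 k).toNat = 0 := by omega
      simp [this]

-- ===== VERDICT (by name: the statement is the Claim_ definition above) =====
theorem rg_spec : Claim_equal_rg := by
  intro a b c _
  unfold Spec_rg rg rg_alt
  by_cases h0 : c = 0
  · simp [h0]
  · rw [dif_neg h0, if_neg h0]
    by_cases hpos : 0 < c
    · rw [dif_pos hpos]
      exact rgPos_eq b c hpos a
    · rw [dif_neg hpos, dif_pos (by omega : c < 0)]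
      exact rgNeg_eq b c (by omega) a
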